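-- pv_equiv track=rewrite | github.com/kuk329/codingTestPractice | programmers/level0/왼쪽 오른쪽.py | solution
-- ===== SOURCE A (Python) =====
-- def solution(str_list):
--     answer = []
--     for idx,s in enumerate(str_list):
--         if s=="l":
--             answer=str_list[:idx]
--             break
--         if s=="r":
--             answer=str_list[idx+1:]
--             break
--
--     return answer
-- ===== SOURCE B (Python) =====
-- def solution(str_list):
--     li = str_list.index("l") if "l" in str_list else None
--     ri = str_list.index("r") if "r" in str_list else None
--     if li is None and ri is None:
--         return []
--     if li is None:
--         return str_list[ri + 1:]
--     if ri is None:
--         return str_list[:li]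
--     return str_list[:li] if li < ri else str_list[ri + 1:]
-- ===== Notes on version B (the rewrite author's own statement) =====
-- stated objective: idiomatic
-- what changed: Replaces the manual enumerate-with-break scan by two built-in first-occurrence searches (list.index guarded by membership) followed by a single position comparison that picks the left or right slice.
import Mathlib
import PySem

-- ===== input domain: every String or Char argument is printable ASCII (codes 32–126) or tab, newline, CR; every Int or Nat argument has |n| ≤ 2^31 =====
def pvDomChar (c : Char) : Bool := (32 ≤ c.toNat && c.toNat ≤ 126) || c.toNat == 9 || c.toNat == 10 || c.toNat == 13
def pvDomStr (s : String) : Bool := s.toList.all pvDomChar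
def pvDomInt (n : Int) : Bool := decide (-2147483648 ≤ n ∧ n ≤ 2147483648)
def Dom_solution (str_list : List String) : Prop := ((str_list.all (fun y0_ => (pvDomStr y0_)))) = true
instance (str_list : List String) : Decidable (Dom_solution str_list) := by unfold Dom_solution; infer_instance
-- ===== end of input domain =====

-- B replaces A's manual enumerate-with-break scan by two built-in first-occurrence
-- searches (list.index guarded by membership) plus one position comparison (idiomatic).


-- ===== PORT A =====
-- the enumerate loop with break, carrying the running index
def solutionLoop (str_list : List String) : Nat → List String → List String
  | _, [] => []
  | idx, s :: rest =>
      if s = "l" then PySem.List.slice str_list none (some (idx : Int))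
      else if s = "r" then PySem.List.slice str_list (some ((idx : Int) + 1)) none
      else solutionLoop str_list (idx + 1) rest

def solution (str_list : List String) : List String :=
  solutionLoop str_list 0 str_list

-- ===== PORT B =====
def solution_alt (str_list : List String) : List String :=
  match PySem.List.index? str_list "l", PySem.List.index? str_list "r" with
  | none, none => []
  | none, some ri => PySem.List.slice str_list (some ((ri : Int) + 1)) none
  | some li, none => PySem.List.slice str_list none (some (li : Int))
  | some li, some ri =>
      if li < ri then PySem.List.slice str_list none (some (li : Int))
      else PySem.List.slice str_list (some ((ri : Int) + 1)) none

-- ===== PRECONDITION & SPEC =====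
def Spec_solution (str_list : List String) (out : List String) : Prop := out = solution_alt str_list
instance (str_list : List String) (out : List String) : Decidable (Spec_solution str_list out) := by unfold Spec_solution; infer_instance

-- ===== CLAIM (what is proved, stated in full; the proofs are below) =====
def Claim_equal_solution : Prop := ∀ (str_list : List String), Dom_solution str_list → Spec_solution str_list (solution str_list)

-- ===== LEMMAS AND PROOFS =====
lemma loop_spec (orig : List String) : ∀ (rest : List String) (idx : Nat),
    solutionLoop orig idx rest =
      match PySem.List.index? rest "l", PySem.List.index? rest "r" with
      | none, none => []
      | none, some ri => PySem.List.slice orig (some (((idx + ri : Nat) : Int) + 1)) none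
      | some li, none => PySem.List.slice orig none (some ((idx + li : Nat) : Int))
      | some li, some ri =>
          if li < ri then PySem.List.slice orig none (some ((idx + li : Nat) : Int))
          else PySem.List.slice orig (some (((idx + ri : Nat) : Int) + 1)) none := by
  intro rest
  induction rest with
  | nil => intro idx; simp [solutionLoop, PySem.List.index?]
  | cons s rest ih =>
    intro idx
    by_cases hl : s = "l"
    · subst hl
      rw [solutionLoop, if_pos rfl]
      rw [PySem.List.index?_cons_of_ne rest (by decide : ("l" : String) ≠ "r"), PySem.List.index?_cons_self]
      cases hr : PySem.List.index? rest "r" with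
      | none => simp
      | some ri => simp
    · by_cases hr : s = "r"
      · subst hr
        rw [solutionLoop, if_neg hl, if_pos rfl]
        rw [PySem.List.index?_cons_of_ne rest (by decide : ("r" : String) ≠ "l"), PySem.List.index?_cons_self]
        cases hL : PySem.List.index? rest "l" with
        | none => simp
        | some li => simp
      · rw [solutionLoop, if_neg hl, if_neg hr, ih (idx + 1)]
        rw [PySem.List.index?_cons_of_ne rest hl,
            PySem.List.index?_cons_of_ne rest hr]
        cases hL : PySem.List.index? rest "l" with
        | none =>
          cases hR : PySem.List.index? rest "r" with
          | none => simp
          | some ri =>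
            simp only [Option.map_some, Option.map_none]
            congr 2
            omega
        | some li =>
          cases hR : PySem.List.index? rest "r" with
          | none =>
            simp only [Option.map_some, Option.map_none]
            congr 2
            omega
          | some ri =>
            simp only [Option.map_some]
            have hlt : li + 1 < ri + 1 ↔ li < ri := by omega
            by_cases h : li < ri
            · rw [if_pos (hlt.mpr h)]
              have : idx + 1 + li = idx + (li + 1) := by omega
              rw [this, if_pos h]
            · rw [if_neg (fun hc => h (hlt.mp hc))]
              have : idx + 1 + ri = idx + (ri + 1) := by omega
              rw [this, if_neg h]

-- ===== VERDICT (by name: the statement is the Claim_ definition above) =====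
theorem solution_spec : Claim_equal_solution := by
  intro str_list _
  unfold Spec_solution solution solution_alt
  rw [loop_spec]
  cases hL : PySem.List.index? str_list "l" with
  | none =>
    cases hR : PySem.List.index? str_list "r" with
    | none => simp
    | some ri => simp
  | some li =>
    cases hR : PySem.List.index? str_list "r" with
    | none => simp
    | some ri => by_cases h : li < ri <;> simp [h]
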